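-- pv_equiv track=rewrite | github.com/kjh1997/algorithm | 4번.py | solution
-- ===== SOURCE A (Python) =====
-- def solution(n):
--     tmp = []
--     num = 0
--     while n > 0:
--         tmp.append(n % 2)
--         n //= 2
--     for i in range(len(tmp)):
--         if tmp[i] == 1:
--             num += 3**i
--     return num
-- ===== SOURCE B (Python) =====
-- def solution(n):
--     if n <= 0:
--         return 0
--     return n % 2 + 3 * solution(n // 2)
-- ===== Notes on version B (the rewrite author's own statement) =====
-- stated objective: simpler
-- what changed: Replaces A's explicit bit-list building loop plus the second summation loop over the collected digits with a single direct recursion combining the low bit and a tripled recursive call on the halved argument.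
import Mathlib
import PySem

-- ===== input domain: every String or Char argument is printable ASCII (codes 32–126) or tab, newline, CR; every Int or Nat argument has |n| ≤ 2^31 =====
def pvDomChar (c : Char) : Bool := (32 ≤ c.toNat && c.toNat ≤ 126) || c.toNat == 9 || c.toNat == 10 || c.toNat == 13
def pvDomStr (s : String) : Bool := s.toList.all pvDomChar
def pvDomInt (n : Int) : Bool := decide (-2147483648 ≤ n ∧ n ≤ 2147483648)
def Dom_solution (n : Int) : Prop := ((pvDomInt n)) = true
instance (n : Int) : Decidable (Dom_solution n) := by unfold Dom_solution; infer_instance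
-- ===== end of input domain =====

-- B replaces A's bit-list loop plus summation loop by one direct recursion; same values, simpler.

-- ===== PORT A =====
-- the while loop: collects n % 2 digits while n > 0
def solLoopA (n : Int) : List Int :=
  if _h : 0 < n then PySem.Int.mod n 2 :: solLoopA (PySem.Int.floordiv n 2) else []
termination_by n.toNat
decreasing_by
  have : PySem.Int.floordiv n 2 = n / 2 := PySem.Int.floordiv_eq_ediv_of_pos (by omega)
  rw [this]; omega

def solution (n : Int) : Int :=
  let tmp := solLoopA n
  (List.range tmp.length).foldl
    (fun (num : Int) (i : Nat) => if PySem.List.pyGetD tmp (i : Int) 0 = 1 then num + 3 ^ i else num) 0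

-- ===== PORT B =====
def solution_alt (n : Int) : Int :=
  if _h : n ≤ 0 then 0
  else PySem.Int.mod n 2 + 3 * solution_alt (PySem.Int.floordiv n 2)
termination_by n.toNat
decreasing_by
  have : PySem.Int.floordiv n 2 = n / 2 := PySem.Int.floordiv_eq_ediv_of_pos (by omega)
  rw [this]; omega

-- ===== PRECONDITION & SPEC =====
def Spec_solution (n : Int) (out : Int) : Prop := out = solution_alt n
instance (n : Int) (out : Int) : Decidable (Spec_solution n out) := by unfold Spec_solution; infer_instance

-- ===== CLAIM (what is proved, stated in full; the proofs are below) =====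
def Claim_equal_solution : Prop := ∀ (n : Int), Dom_solution n → Spec_solution n (solution n)

-- ===== LEMMAS AND PROOFS =====

-- A's second loop, as a function of the digit list
def sumA (tmp : List Int) : Int :=
  (List.range tmp.length).foldl
    (fun (num : Int) (i : Nat) => if PySem.List.pyGetD tmp (i : Int) 0 = 1 then num + 3 ^ i else num) 0

theorem foldl_if_add_shift (P : Nat → Prop) [DecidablePred P] (w : Nat → Int) :
    ∀ (l : List Nat) (a : Int),
      List.foldl (fun num i => if P i then num + w i else num) a l
        = a + List.foldl (fun num i => if P i then num + w i else num) 0 l := by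
  intro l
  induction l with
  | nil => intro a; simp
  | cons x xs ih =>
    intro a
    simp only [List.foldl_cons]
    rw [ih, ih (if P x then 0 + w x else 0)]
    split_ifs <;> ring

theorem sumA_cons (b : Int) (t : List Int) :
    sumA (b :: t) = (if b = 1 then 1 else 0) + 3 * sumA t := by
  unfold sumA
  simp only [List.length_cons]
  rw [List.range_succ_eq_map, List.foldl_cons, List.foldl_map]
  have h1 : ∀ (i : Nat), PySem.List.pyGetD (b :: t) ((Nat.succ i : Nat) : Int) 0 = PySem.List.pyGetD t (i : Int) 0 := by
    intro i
    rw [PySem.List.pyGetD_natCast, PySem.List.pyGetD_natCast]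
    simp
  have h0 : PySem.List.pyGetD (b :: t) ((0 : Nat) : Int) 0 = b := by
    simp
  simp only [h0, h1, pow_succ, pow_zero]
  -- now both folds range over List.range t.length; show linearity in the accumulator and factor out 3
  have key : ∀ (l : List Nat) (a : Int),
      List.foldl (fun (num : Int) (i : Nat) => if PySem.List.pyGetD t (i : Int) 0 = 1 then num + 3 ^ i * 3 else num) a l
        = a + 3 * List.foldl (fun (num : Int) (i : Nat) => if PySem.List.pyGetD t (i : Int) 0 = 1 then num + 3 ^ i else num) 0 l := by
    intro l
    induction l with
    | nil => intro a; simp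
    | cons x xs ih =>
      intro a
      simp only [List.foldl_cons]
      rw [ih,
        foldl_if_add_shift (fun i => PySem.List.pyGetD t (i : Int) 0 = 1) (fun i => 3 ^ i)
          xs (if PySem.List.pyGetD t (x : Int) 0 = 1 then 0 + 3 ^ x else 0)]
      split_ifs <;> ring
  rw [key]
  split_ifs <;> ring

theorem solLoopA_pos (n : Int) (h : 0 < n) :
    solLoopA n = PySem.Int.mod n 2 :: solLoopA (PySem.Int.floordiv n 2) := by
  rw [solLoopA]; simp [h]

theorem solLoopA_nonpos (n : Int) (h : ¬ 0 < n) : solLoopA n = [] := by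
  rw [solLoopA]; simp [h]

theorem main_eq : ∀ (k : Nat) (n : Int), n.toNat ≤ k → sumA (solLoopA n) = solution_alt n := by
  intro k
  induction k with
  | zero =>
    intro n hn
    have hle : n ≤ 0 := by omega
    rw [solLoopA_nonpos n (by omega), solution_alt]
    rw [dif_pos hle]
    rfl
  | succ k ih =>
    intro n hn
    by_cases hpos : 0 < n
    · have hfd : PySem.Int.floordiv n 2 = n / 2 := PySem.Int.floordiv_eq_ediv_of_pos (by omega)
      have hmd : PySem.Int.mod n 2 = n % 2 := PySem.Int.mod_eq_emod_of_pos (by omega)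
      rw [solLoopA_pos n hpos, sumA_cons, ih (PySem.Int.floordiv n 2) (by rw [hfd]; omega)]
      have hns : ¬ n ≤ 0 := by omega
      conv_rhs => rw [solution_alt]
      rw [dif_neg hns]
      have : (if PySem.Int.mod n 2 = 1 then (1 : Int) else 0) = PySem.Int.mod n 2 := by
        rw [hmd]; split_ifs with h <;> omega
      rw [this]
    · rw [solLoopA_nonpos n hpos, solution_alt]
      have hle : n ≤ 0 := by omega
      rw [dif_pos hle]
      rfl

-- ===== VERDICT (by name: the statement is the Claim_ definition above) =====
theorem solution_spec : Claim_equal_solution := by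
  intro n _
  show solution n = solution_alt n
  have : solution n = sumA (solLoopA n) := rfl
  rw [this, main_eq n.toNat n le_rfl]
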